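-- pv_equiv track=rewrite | github.com/rvfalves/trilha-python-dio | 02 - Programação Orientada a Objetos/10 - desafio/desafio_codigo_3.py | filtrar_visuais
-- ===== SOURCE A (Python) =====
-- def filtrar_visuais(lista_visuais):
--     # Converter a string de entrada em uma lista
--     visuais = lista_visuais.split(", ")
--
--     # TODO: Normalize e remova duplicatas usando um conjunto
--     normalizada = []
--     for visual in visuais:
--         normalizada.append(visual.title())
--     visuais = set(normalizada)
--
--     # TODO: Converta o conjunto de volta para uma lista ordenada:
--     lista_final = list(visuais)
--     lista_final.sort()
--     # Unir a lista em uma string, separada por vírgulas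
--     return ", ".join(lista_final)
-- ===== SOURCE B (Python) =====
-- def filtrar_visuais(lista_visuais):
--     # Title-case every item, sort, then one linear pass keeping only
--     # elements that differ from the previously kept one (sorted-adjacent dedup).
--     itens = sorted(v.title() for v in lista_visuais.split(", "))
--     resultado = []
--     ultimo = None
--     for item in itens:
--         if item != ultimo:
--             resultado.append(item)
--             ultimo = item
--     return ", ".join(resultado)
-- ===== Notes on version B (the rewrite author's own statement) =====
-- stated objective: alternative
-- what changed: Dedup via a set before sorting is replaced by sorting the title-cased list first and deduplicating in one linear scan that keeps an element only when it differs from the last kept one.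
import Mathlib
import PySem

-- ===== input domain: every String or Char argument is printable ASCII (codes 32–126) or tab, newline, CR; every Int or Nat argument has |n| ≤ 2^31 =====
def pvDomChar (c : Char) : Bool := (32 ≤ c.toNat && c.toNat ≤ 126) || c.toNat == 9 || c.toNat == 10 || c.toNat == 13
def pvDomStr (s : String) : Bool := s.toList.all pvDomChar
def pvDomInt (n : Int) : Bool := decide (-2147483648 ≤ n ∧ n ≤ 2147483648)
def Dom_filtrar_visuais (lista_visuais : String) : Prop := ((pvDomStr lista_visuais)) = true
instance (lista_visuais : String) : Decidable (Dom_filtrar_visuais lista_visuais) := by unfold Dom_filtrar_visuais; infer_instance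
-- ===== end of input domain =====

-- B replaces A's set-then-sort dedup by sort-then-adjacent-scan dedup (objective: alternative decomposition, same cost).

-- shared primitive: str.title(), exact on ASCII (word boundary = previous char not alphabetic)
def pyTitleGo : Bool → List Char → List Char
  | _, [] => []
  | prev, c :: cs =>
      if PySem.Chars.isalpha c then
        (if prev then PySem.Chars.lowerChar c else PySem.Chars.upperChar c) :: pyTitleGo true cs
      else c :: pyTitleGo false cs

def pyTitle (s : String) : String := String.ofList (pyTitleGo false s.toList)

-- ===== PORT A =====
def filtrar_visuais (lista_visuais : String) : String :=
  let visuais := (PySem.Str.split? lista_visuais ", ").getD []   -- sep is nonempty: split? is always some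
  let normalizada := visuais.foldl (fun acc visual => acc ++ [pyTitle visual]) []
  let visuais2 := PySem.Set.ofList normalizada
  let lista_final := PySem.List.sorted visuais2 (fun x => x)
  PySem.Str.join ", " lista_final

-- ===== PORT B =====
def filtrar_visuais_alt (lista_visuais : String) : String :=
  let itens := PySem.List.sorted
      ((((PySem.Str.split? lista_visuais ", ").getD []).map pyTitle)) (fun x => x)
  let st := itens.foldl
      (fun (st : List String × Option String) item =>
        if some item ≠ st.2 then (st.1 ++ [item], some item) else st)
      ([], none)
  PySem.Str.join ", " st.1

-- ===== PRECONDITION & SPEC =====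
def Spec_filtrar_visuais (lista_visuais : String) (out : String) : Prop := out = filtrar_visuais_alt lista_visuais
instance (lista_visuais : String) (out : String) : Decidable (Spec_filtrar_visuais lista_visuais out) := by unfold Spec_filtrar_visuais; infer_instance

-- ===== CLAIM (what is proved, stated in full; the proofs are below) =====
def Claim_equal_filtrar_visuais : Prop := ∀ (lista_visuais : String), Dom_filtrar_visuais lista_visuais → Spec_filtrar_visuais lista_visuais (filtrar_visuais lista_visuais)

-- ===== LEMMAS AND PROOFS =====

-- structural form of B's dedup loop
def dedupAdj : List String → Option String → List String
  | [], _ => []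
  | x :: xs, last => if some x ≠ last then x :: dedupAdj xs (some x) else dedupAdj xs last

theorem foldl_dedupAdj (l : List String) (acc : List String) (last : Option String) :
    (l.foldl (fun (st : List String × Option String) item =>
        if some item ≠ st.2 then (st.1 ++ [item], some item) else st) (acc, last)).1
      = acc ++ dedupAdj l last := by
  induction l generalizing acc last with
  | nil => simp [dedupAdj]
  | cons x xs ih =>
      simp only [List.foldl_cons]
      by_cases h : some x = last
      · rw [show (if some x ≠ (acc, last).2 then ((acc, last).1 ++ [x], some x) else (acc, last))
              = (acc, last) from by simp [h]]
        rw [ih, dedupAdj, if_neg (by simpa using h)]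
      · rw [show (if some x ≠ (acc, last).2 then ((acc, last).1 ++ [x], some x) else (acc, last))
              = (acc ++ [x], some x) from by simp [h]]
        rw [ih, dedupAdj, if_pos (by simpa using h)]
        simp

theorem mem_dedupAdj (l : List String) (last : Option String)
    (hs : l.Pairwise (· ≤ ·)) (hlb : ∀ y ∈ l, ∀ v, last = some v → v ≤ y) :
    ∀ x, x ∈ dedupAdj l last ↔ x ∈ l ∧ some x ≠ last := by
  induction l generalizing last with
  | nil => simp [dedupAdj]
  | cons a as ih =>
      have hsa : as.Pairwise (· ≤ ·) := hs.tail
      have hle : ∀ y ∈ as, a ≤ y := fun y hy => (List.pairwise_cons.mp hs).1 y hy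
      intro x
      by_cases h : some a = last
      · rw [dedupAdj, if_neg (by simpa using h)]
        rw [ih last hsa (fun y hy v hv => hlb y (List.mem_cons_of_mem _ hy) v hv) x]
        constructor
        · rintro ⟨hx, hne⟩; exact ⟨List.mem_cons_of_mem _ hx, hne⟩
        · rintro ⟨hx, hne⟩
          rcases List.mem_cons.mp hx with rfl | hx
          · exact absurd h hne
          · exact ⟨hx, hne⟩
      · rw [dedupAdj, if_pos (by simpa using h)]
        have ihx := ih (some a) hsa (fun y hy v hv => by
          have hv' := Option.some_inj.mp hv; subst hv'; exact hle y hy) x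
        rw [List.mem_cons, ihx]
        constructor
        · rintro (rfl | ⟨hx, hne⟩)
          · exact ⟨List.mem_cons_self, by simpa using h⟩
          · refine ⟨List.mem_cons_of_mem _ hx, fun hxl => ?_⟩
            have hxa : x ≤ a := hlb a List.mem_cons_self x hxl.symm
            have hax : a ≤ x := hle x hx
            exact h (by rw [le_antisymm hax hxa]; exact hxl)
        · rintro ⟨hx, hne⟩
          rcases List.mem_cons.mp hx with rfl | hx
          · exact Or.inl rfl
          · by_cases hxa : some x = some a
            · exact Or.inl (Option.some_inj.mp hxa)
            · exact Or.inr ⟨hx, hxa⟩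

theorem pairwise_dedupAdj (l : List String) (last : Option String)
    (hs : l.Pairwise (· ≤ ·)) (hlb : ∀ y ∈ l, ∀ v, last = some v → v ≤ y) :
    (dedupAdj l last).Pairwise (· < ·) := by
  induction l generalizing last with
  | nil => exact List.Pairwise.nil
  | cons a as ih =>
      have hsa : as.Pairwise (· ≤ ·) := hs.tail
      have hle : ∀ y ∈ as, a ≤ y := fun y hy => (List.pairwise_cons.mp hs).1 y hy
      by_cases h : some a = last
      · rw [dedupAdj, if_neg (by simpa using h)]
        exact ih last hsa (fun y hy v hv => hlb y (List.mem_cons_of_mem _ hy) v hv)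
      · rw [dedupAdj, if_pos (by simpa using h)]
        have hlb' : ∀ y ∈ as, ∀ v, (some a : Option String) = some v → v ≤ y := fun y hy v hv => by
          have hv' := Option.some_inj.mp hv; subst hv'; exact hle y hy
        refine List.pairwise_cons.mpr ⟨?_, ih (some a) hsa hlb'⟩
        intro y hy
        have := (mem_dedupAdj as (some a) hsa hlb' y).mp hy
        exact lt_of_le_of_ne (hle y this.1) (fun hxy => this.2 (congrArg some hxy.symm))

theorem sorted_set_eq_dedupAdj (ts : List String) :
    PySem.List.sorted (PySem.Set.ofList ts) (fun x => x)
      = dedupAdj (PySem.List.sorted ts (fun x => x)) none := by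
  have hs : (PySem.List.sorted ts (fun x => x)).Pairwise (· ≤ ·) :=
    PySem.List.sorted_pairwise ts (fun x => x)
  have hlb : ∀ y ∈ PySem.List.sorted ts (fun x => x), ∀ v, (none : Option String) = some v → v ≤ y := by
    intro y _ v hv; cases hv
  have hmem : ∀ x, x ∈ dedupAdj (PySem.List.sorted ts (fun x => x)) none ↔ x ∈ ts := by
    intro x
    rw [mem_dedupAdj _ none hs hlb x, PySem.List.mem_sorted]
    simp
  have hpw : (dedupAdj (PySem.List.sorted ts (fun x => x)) none).Pairwise (· < ·) :=
    pairwise_dedupAdj _ none hs hlb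
  refine PySem.List.sorted_eq_of_perm_of_pairwise_lt _ _ _ ?_ hpw
  refine List.perm_of_nodup_nodup_toFinset_eq
    (hpw.imp (fun h => ne_of_lt h)) (PySem.Set.nodup_ofList ts) ?_
  ext x
  simp [hmem x, PySem.Set.mem_ofList]

-- ===== VERDICT (by name: the statement is the Claim_ definition above) =====
theorem filtrar_visuais_spec : Claim_equal_filtrar_visuais := by
  intro s _
  show filtrar_visuais s = filtrar_visuais_alt s
  simp only [filtrar_visuais, filtrar_visuais_alt,
    PySem.List.foldl_append_singleton_eq_map, List.nil_append]
  rw [foldl_dedupAdj, List.nil_append, sorted_set_eq_dedupAdj]
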